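-- pv_equiv track=rewrite | github.com/rowroh/figma-qa-testcase-generator | src/generators/testcase_generator.py | _optimize_testcases
-- ===== SOURCE A (Python) =====
-- from typing import Dict, List, Optional, Any
--
-- def _optimize_testcases(testcases: List[Dict]) -> List[Dict]:
--     """테스트케이스 최적화 (중복 제거, 우선순위 조정)"""
--     # 제목 기반 중복 제거
--     seen_titles = set()
--     unique_testcases = []
--
--     for testcase in testcases:
--         title = testcase.get("title", "")
--         if title not in seen_titles:
--             seen_titles.add(title)
--             unique_testcases.append(testcase)
--
--     # 우선순위별 정렬 (P1 > P2 > P3 > P4)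
--     priority_order = {"P1": 1, "P2": 2, "P3": 3, "P4": 4}
--     unique_testcases.sort(key=lambda x: priority_order.get(x.get("priority", "P4"), 4))
--
--     return unique_testcases
-- ===== SOURCE B (Python) =====
-- def _optimize_testcases(testcases):
--     """Single pass: dedup by title and distribute into four priority buckets (no sort call)."""
--     seen = set()
--     b1, b2, b3, b4 = [], [], [], []
--     rank = {"P1": 1, "P2": 2, "P3": 3, "P4": 4}
--     for tc in testcases:
--         title = tc.get("title", "")
--         if title in seen:
--             continue
--         seen.add(title)
--         k = rank.get(tc.get("priority", "P4"), 4)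
--         if k == 1:
--             b1.append(tc)
--         elif k == 2:
--             b2.append(tc)
--         elif k == 3:
--             b3.append(tc)
--         else:
--             b4.append(tc)
--     return b1 + b2 + b3 + b4
-- ===== Notes on version B (the rewrite author's own statement) =====
-- stated objective: alternative
-- what changed: B replaces A's dedup pass followed by a stable comparison sort with a single pass that deduplicates by title and distributes each testcase into one of four priority buckets, returning the buckets' concatenation (a counting/bucket sort with no sort call).
import Mathlib
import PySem

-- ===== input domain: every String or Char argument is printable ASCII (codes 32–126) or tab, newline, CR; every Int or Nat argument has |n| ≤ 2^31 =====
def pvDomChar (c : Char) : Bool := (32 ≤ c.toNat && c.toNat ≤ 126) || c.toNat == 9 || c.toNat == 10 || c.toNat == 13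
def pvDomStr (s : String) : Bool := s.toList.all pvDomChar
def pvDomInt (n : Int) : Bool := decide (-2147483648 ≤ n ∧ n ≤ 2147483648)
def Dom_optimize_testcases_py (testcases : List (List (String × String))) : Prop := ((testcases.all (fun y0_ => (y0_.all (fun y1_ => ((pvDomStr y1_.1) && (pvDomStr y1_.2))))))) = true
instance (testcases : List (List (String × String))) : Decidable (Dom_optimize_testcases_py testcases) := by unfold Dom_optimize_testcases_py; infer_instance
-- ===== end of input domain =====

-- B replaces A's dedup-then-comparison-sort with a single dedup pass that distributes
-- into four priority buckets whose concatenation is returned (no sort call).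

-- shared helpers for both ports: tc.get("title", "") and
-- {"P1":1,"P2":2,"P3":3,"P4":4}.get(tc.get("priority","P4"), 4)
def pvTitle (tc : List (String × String)) : String :=
  PySem.Dict.getD (PySem.Dict.mk tc) "title" ""

def pvKey (tc : List (String × String)) : Int :=
  PySem.Dict.getD (PySem.Dict.mk [("P1", (1 : Int)), ("P2", 2), ("P3", 3), ("P4", 4)])
    (PySem.Dict.getD (PySem.Dict.mk tc) "priority" "P4") 4

-- ===== PORT A =====
-- the loop body of A's dedup for-loop
def pvStepA (acc : PySem.Set String × List (List (String × String)))
    (tc : List (String × String)) : PySem.Set String × List (List (String × String)) :=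
  if pvTitle tc ∈ acc.1 then acc
  else (PySem.Set.add acc.1 (pvTitle tc), acc.2 ++ [tc])

def optimize_testcases_py (testcases : List (List (String × String))) : List (List (String × String)) :=
  let st := testcases.foldl pvStepA (PySem.Set.ofList [], [])
  PySem.List.sorted st.2 pvKey false

-- ===== PORT B =====
-- the loop body of B's single pass: skip seen titles, else append to the bucket of pvKey tc
def pvStepB
    (acc : PySem.Set String × List (List (String × String)) × List (List (String × String)) ×
      List (List (String × String)) × List (List (String × String)))
    (tc : List (String × String)) :
    PySem.Set String × List (List (String × String)) × List (List (String × String)) ×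
      List (List (String × String)) × List (List (String × String)) :=
  if pvTitle tc ∈ acc.1 then acc
  else
    let s := PySem.Set.add acc.1 (pvTitle tc)
    let k := pvKey tc
    if k = 1 then (s, acc.2.1 ++ [tc], acc.2.2.1, acc.2.2.2.1, acc.2.2.2.2)
    else if k = 2 then (s, acc.2.1, acc.2.2.1 ++ [tc], acc.2.2.2.1, acc.2.2.2.2)
    else if k = 3 then (s, acc.2.1, acc.2.2.1, acc.2.2.2.1 ++ [tc], acc.2.2.2.2)
    else (s, acc.2.1, acc.2.2.1, acc.2.2.2.1, acc.2.2.2.2 ++ [tc])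

def optimize_testcases_py_alt (testcases : List (List (String × String))) : List (List (String × String)) :=
  let st := testcases.foldl pvStepB (PySem.Set.ofList [], [], [], [], [])
  st.2.1 ++ st.2.2.1 ++ st.2.2.2.1 ++ st.2.2.2.2

-- ===== PRECONDITION & SPEC =====
def Spec_optimize_testcases_py (testcases : List (List (String × String))) (out : List (List (String × String))) : Prop := out = optimize_testcases_py_alt testcases
instance (testcases : List (List (String × String))) (out : List (List (String × String))) : Decidable (Spec_optimize_testcases_py testcases out) := by unfold Spec_optimize_testcases_py; infer_instance

-- ===== CLAIM (what is proved, stated in full; the proofs are below) =====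
def Claim_equal_optimize_testcases_py : Prop := ∀ (testcases : List (List (String × String))), Dom_optimize_testcases_py testcases → Spec_optimize_testcases_py testcases (optimize_testcases_py testcases)

-- ===== LEMMAS AND PROOFS =====

-- the deduplicated sublist (new items only), as a structural recursion
def pvDedup (s : PySem.Set String) : List (List (String × String)) → List (List (String × String))
  | [] => []
  | tc :: rest =>
      if pvTitle tc ∈ s then pvDedup s rest
      else tc :: pvDedup (PySem.Set.add s (pvTitle tc)) rest

-- the seen-set after processing, shared by both loops
def pvSeen (s : PySem.Set String) : List (List (String × String)) → PySem.Set String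
  | [] => s
  | tc :: rest =>
      if pvTitle tc ∈ s then pvSeen s rest
      else pvSeen (PySem.Set.add s (pvTitle tc)) rest

theorem pvKey_mem (tc : List (String × String)) :
    pvKey tc = 1 ∨ pvKey tc = 2 ∨ pvKey tc = 3 ∨ pvKey tc = 4 := by
  unfold pvKey
  generalize PySem.Dict.getD (PySem.Dict.mk tc) "priority" "P4" = p
  rw [PySem.Dict.getD_eq_get?_getD]
  simp [PySem.Dict.get?, List.find?_cons]
  (repeat' split) <;> simp

theorem foldl_stepA (xs : List (List (String × String))) :
    ∀ (s : PySem.Set String) (u : List (List (String × String))),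
      xs.foldl pvStepA (s, u) = (pvSeen s xs, u ++ pvDedup s xs) := by
  induction xs with
  | nil => intro s u; simp [pvSeen, pvDedup]
  | cons tc rest ih =>
      intro s u
      by_cases h : pvTitle tc ∈ s <;>
        simp [pvStepA, pvSeen, pvDedup, h, ih]

theorem foldl_stepB (xs : List (List (String × String))) :
    ∀ (s : PySem.Set String) (b1 b2 b3 b4 : List (List (String × String))),
      xs.foldl pvStepB (s, b1, b2, b3, b4) =
        (pvSeen s xs,
         b1 ++ (pvDedup s xs).filter (fun t => decide (pvKey t = 1)),
         b2 ++ (pvDedup s xs).filter (fun t => decide (pvKey t = 2)),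
         b3 ++ (pvDedup s xs).filter (fun t => decide (pvKey t = 3)),
         b4 ++ (pvDedup s xs).filter (fun t => decide (pvKey t = 4))) := by
  induction xs with
  | nil => intro s b1 b2 b3 b4; simp [pvSeen, pvDedup]
  | cons tc rest ih =>
      intro s b1 b2 b3 b4
      by_cases h : pvTitle tc ∈ s
      · simp [pvStepB, pvSeen, pvDedup, h, ih]
      · rcases pvKey_mem tc with hk | hk | hk | hk <;>
          simp [pvStepB, pvSeen, pvDedup, h, hk, ih]
  
theorem insertBy_split {α : Type} (before : α → α → Bool) (x : α) (u v : List α)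
    (hu : ∀ y ∈ u, before x y = false) (hv : ∀ y ∈ v, before x y = true) :
    PySem.List.insertBy before x (u ++ v) = u ++ x :: v := by
  induction u with
  | nil =>
      cases v with
      | nil => simp [PySem.List.insertBy]
      | cons h t => simp [PySem.List.insertBy, hv h (by simp)]
  | cons a u ih =>
      simp only [List.cons_append, PySem.List.insertBy, hu a (by simp), Bool.false_eq_true,
        if_false, List.cons.injEq, true_and]
      exact ih (fun y hy => hu y (by simp [hy]))

theorem key_of_mem_filter {l : List (List (String × String))} {i : Int}
    {y : List (String × String)}
    (hy : y ∈ l.filter (fun t => decide (pvKey t = i))) : pvKey y = i := by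
  simpa using (List.mem_filter.mp hy).2

theorem sorted_buckets (l : List (List (String × String))) :
    PySem.List.sorted l pvKey false =
      l.filter (fun t => decide (pvKey t = 1)) ++ l.filter (fun t => decide (pvKey t = 2)) ++
      l.filter (fun t => decide (pvKey t = 3)) ++ l.filter (fun t => decide (pvKey t = 4)) := by
  induction l using List.reverseRecOn with
  | nil => simp [PySem.List.sorted]
  | append_singleton l x ih =>
      rw [PySem.List.sorted_eq_foldl_insertBy, List.foldl_append,
        ← PySem.List.sorted_eq_foldl_insertBy, ih]
      simp only [List.foldl_cons, List.foldl_nil, List.filter_append, List.filter_cons,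
        List.filter_nil]
      rcases pvKey_mem x with hk | hk | hk | hk <;> simp only [hk] <;> norm_num
      · -- key 1: x goes after bucket 1, before buckets 2-4
        simpa using insertBy_split (fun a b => decide (pvKey a < pvKey b)) x
          (l.filter (fun t => decide (pvKey t = 1)))
          (l.filter (fun t => decide (pvKey t = 2)) ++
            (l.filter (fun t => decide (pvKey t = 3)) ++ l.filter (fun t => decide (pvKey t = 4))))
          (fun y hy => by simp [hk, key_of_mem_filter hy])
          (fun y hy => by
            rcases List.mem_append.mp hy with h' | h'
            · simp [hk, key_of_mem_filter h']
            · rcases List.mem_append.mp h' with h2 | h2 <;> simp [hk, key_of_mem_filter h2])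
      · -- key 2
        simpa using insertBy_split (fun a b => decide (pvKey a < pvKey b)) x
          (l.filter (fun t => decide (pvKey t = 1)) ++ l.filter (fun t => decide (pvKey t = 2)))
          (l.filter (fun t => decide (pvKey t = 3)) ++ l.filter (fun t => decide (pvKey t = 4)))
          (fun y hy => by
            rcases List.mem_append.mp hy with h' | h' <;> simp [hk, key_of_mem_filter h'])
          (fun y hy => by
            rcases List.mem_append.mp hy with h' | h' <;> simp [hk, key_of_mem_filter h'])
      · -- key 3
        simpa using insertBy_split (fun a b => decide (pvKey a < pvKey b)) x
          (l.filter (fun t => decide (pvKey t = 1)) ++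
            (l.filter (fun t => decide (pvKey t = 2)) ++ l.filter (fun t => decide (pvKey t = 3))))
          (l.filter (fun t => decide (pvKey t = 4)))
          (fun y hy => by
            rcases List.mem_append.mp hy with h' | h'
            · simp [hk, key_of_mem_filter h']
            · rcases List.mem_append.mp h' with h2 | h2 <;> simp [hk, key_of_mem_filter h2])
          (fun y hy => by simp [hk, key_of_mem_filter hy])
      · -- key 4: x goes last
        simpa using insertBy_split (fun a b => decide (pvKey a < pvKey b)) x
          (l.filter (fun t => decide (pvKey t = 1)) ++
            (l.filter (fun t => decide (pvKey t = 2)) ++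
              (l.filter (fun t => decide (pvKey t = 3)) ++ l.filter (fun t => decide (pvKey t = 4)))))
          []
          (fun y hy => by
            rcases List.mem_append.mp hy with h' | h'
            · simp [hk, key_of_mem_filter h']
            · rcases List.mem_append.mp h' with h2 | h2
              · simp [hk, key_of_mem_filter h2]
              · rcases List.mem_append.mp h2 with h3 | h3 <;> simp [hk, key_of_mem_filter h3])
          (fun y hy => by simp at hy)

-- ===== VERDICT (by name: the statement is the Claim_ definition above) =====
theorem optimize_testcases_py_spec : Claim_equal_optimize_testcases_py := by
  intro testcases _
  unfold Spec_optimize_testcases_py optimize_testcases_py optimize_testcases_py_alt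
  rw [foldl_stepA, foldl_stepB]
  simp [sorted_buckets]
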